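-- pv_equiv track=rewrite | github.com/Nextomics/NextPolish | source/lib/kit.py | remove_option
-- ===== SOURCE A (Python) =====
-- def remove_option(content, option):
-- 	'''-p1 [4] -p2 [smp [5]] -p3 [ad] =>  -p1 [4] -p3 [ad]'''
-- 	contents = content.strip().split()
-- 	contents_len = len(contents)
-- 	for i in range(contents_len):
-- 		if contents[i] == option:
-- 			break
-- 	else:
-- 		return content
-- 	v = i + 1
-- 	while v < contents_len and not contents[v].startswith('-'):
-- 		v += 1
-- 	return " ".join(contents[:i] + contents[v:])
-- ===== SOURCE B (Python) =====
-- def remove_option(content, option):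
--     '''-p1 [4] -p2 [smp [5]] -p3 [ad] =>  -p1 [4] -p3 [ad]'''
--     out = []
--     state = 0  # 0 = searching for option, 1 = skipping its arguments, 2 = copying the rest
--     for tok in content.strip().split():
--         if state == 0:
--             if tok == option:
--                 state = 1
--             else:
--                 out.append(tok)
--         elif state == 1:
--             if tok.startswith('-'):
--                 state = 2
--                 out.append(tok)
--         else:
--             out.append(tok)
--     if state == 0:
--         return content
--     return " ".join(out)
-- ===== Notes on version B (the rewrite author's own statement) =====
-- stated objective: simpler
-- what changed: Replaces A's index-based find loop (for/else with break) plus separate while-loop over indices and list slicing by a single linear pass over the tokens with a three-state accumulator (searching / skipping arguments / copying).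
import Mathlib
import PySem

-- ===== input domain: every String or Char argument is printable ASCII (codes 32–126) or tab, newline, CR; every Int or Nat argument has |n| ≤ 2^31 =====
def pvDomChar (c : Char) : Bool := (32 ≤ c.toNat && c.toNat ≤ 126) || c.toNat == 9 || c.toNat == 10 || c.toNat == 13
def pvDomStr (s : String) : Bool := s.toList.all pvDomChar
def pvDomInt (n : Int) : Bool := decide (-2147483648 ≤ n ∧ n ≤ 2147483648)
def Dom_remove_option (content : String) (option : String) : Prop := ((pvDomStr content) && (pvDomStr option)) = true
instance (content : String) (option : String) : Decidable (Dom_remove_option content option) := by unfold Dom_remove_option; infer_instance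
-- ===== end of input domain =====

-- B replaces A's index-based find loop + while-loop + slicing by one linear pass with a
-- three-state accumulator; same behaviour, simpler decomposition.

-- ===== PORT A =====
-- 'for i in range(contents_len): if contents[i] == option: break / else: return content'
-- (structural recursion over the token list carrying the index i)
def pvFindA (tokens : List String) (option : String) (i : Nat) : Option Nat :=
  match tokens with
  | [] => none
  | t :: ts => if t = option then some i else pvFindA ts option (i + 1)

-- 'while v < contents_len and not contents[v].startswith("-"): v += 1'
def pvSkipA (tokens : List String) (v : Nat) : Nat :=
  if h : v < tokens.length then
    if ¬ PySem.Str.startswith tokens[v] "-" then pvSkipA tokens (v + 1) else v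
  else v
termination_by tokens.length - v

def remove_option (content : String) (option : String) : String :=
  let contents := PySem.Str.split₀ (PySem.Str.strip content)
  match pvFindA contents option 0 with
  | none => content
  | some i =>
    let v := pvSkipA contents (i + 1)
    PySem.Str.join " " (contents.take i ++ contents.drop v)

-- ===== PORT B =====
-- state 0 = searching for option, 1 = skipping its arguments, 2 = copying the rest
def pvStepB (option : String) (st : Nat × List String) (t : String) : Nat × List String :=
  if st.1 = 0 then
    if t = option then (1, st.2) else (0, st.2 ++ [t])
  else if st.1 = 1 then
    if PySem.Str.startswith t "-" then (2, st.2 ++ [t]) else (1, st.2)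
  else (2, st.2 ++ [t])

def remove_option_alt (content : String) (option : String) : String :=
  let tokens := PySem.Str.split₀ (PySem.Str.strip content)
  let r := tokens.foldl (pvStepB option) (0, [])
  if r.1 = 0 then content else PySem.Str.join " " r.2

-- ===== PRECONDITION & SPEC =====
def Spec_remove_option (content : String) (option : String) (out : String) : Prop := out = remove_option_alt content option
instance (content : String) (option : String) (out : String) : Decidable (Spec_remove_option content option out) := by unfold Spec_remove_option; infer_instance

-- ===== CLAIM (what is proved, stated in full; the proofs are below) =====
def Claim_equal_remove_option : Prop := ∀ (content : String) (option : String), Dom_remove_option content option → Spec_remove_option content option (remove_option content option)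

-- ===== LEMMAS AND PROOFS =====

-- A's find loop finds nothing iff the option is not among the tokens
lemma pvFindA_eq_none {option : String} : ∀ (ts : List String) (i : Nat),
    pvFindA ts option i = none ↔ option ∉ ts := by
  intro ts
  induction ts with
  | nil => simp [pvFindA]
  | cons t ts ih =>
    intro i
    by_cases h : t = option
    · simp [pvFindA, h]
    · simp only [pvFindA, if_neg h, ih, List.mem_cons, not_or]
      constructor
      · exact fun hn => ⟨fun he => h he.symm, hn⟩
      · exact fun hn => hn.2

-- shifting the index accumulator
lemma pvFindA_shift {option : String} : ∀ (ts : List String) (i : Nat),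
    pvFindA ts option i = (pvFindA ts option 0).map (· + i) := by
  intro ts
  induction ts with
  | nil => simp [pvFindA]
  | cons t ts ih =>
    intro i
    by_cases h : t = option
    · simp [pvFindA, h]
    · simp only [pvFindA, if_neg h, ih 1, ih (i + 1), Option.map_map]
      congr 1
      funext x
      simp only [Function.comp_apply]
      omega

-- A's found index decomposes the token list along the first occurrence of option
lemma pvFindA_decomp {option : String} : ∀ (ts : List String) (i : Nat),
    pvFindA ts option 0 = some i →
      i < ts.length ∧
      ts.take i = ts.takeWhile (fun t => t != option) ∧
      ts.drop (i + 1) = (ts.dropWhile (fun t => t != option)).tail := by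
  intro ts
  induction ts with
  | nil => intro i h; simp [pvFindA] at h
  | cons t ts ih =>
    intro i h
    by_cases ht : t = option
    · simp [pvFindA, ht] at h
      subst h
      subst ht
      simp
    · simp only [pvFindA, if_neg ht] at h
      rw [pvFindA_shift] at h
      cases hj : pvFindA ts option 0 with
      | none => simp [hj] at h
      | some j =>
        simp [hj] at h
        obtain ⟨hlt, htake, hdrop⟩ := ih j hj
        subst h
        refine ⟨by simpa using Nat.succ_lt_succ hlt, ?_, ?_⟩
        · simp [ht, htake]
        · simp [ht, hdrop]

-- A's while loop drops exactly the leading non-dash tokens of the suffix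
lemma pvSkipA_drop : ∀ (ts : List String) (v : Nat),
    ts.drop (pvSkipA ts v) = (ts.drop v).dropWhile (fun t => !PySem.Str.startswith t "-") := by
  intro ts v
  fun_induction pvSkipA ts v with
  | case1 v h hnd ih =>
    have hnd' : PySem.Chars.startswith ts[v].toList ['-'] = false := by simpa using hnd
    rw [ih, List.drop_eq_getElem_cons h, List.dropWhile_cons]
    simp [hnd']
  | case2 v h hd =>
    simp only [not_not] at hd
    have hd' : PySem.Chars.startswith ts[v].toList ['-'] = true := by simpa using hd
    rw [List.drop_eq_getElem_cons h, List.dropWhile_cons]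
    simp [hd']
  | case3 v h =>
    rw [List.drop_eq_nil_of_le (by omega)]
    simp

-- B's fold from state 2 copies everything
lemma foldB_state2 (option : String) : ∀ (ts out : List String),
    ts.foldl (pvStepB option) (2, out) = (2, out ++ ts) := by
  intro ts
  induction ts with
  | nil => simp
  | cons t ts ih => intro out; simp [pvStepB, ih]

-- B's fold from state 1 drops the leading non-dash tokens and never returns to state 0
lemma foldB_state1 (option : String) : ∀ (ts out : List String),
    (ts.foldl (pvStepB option) (1, out)).1 ≠ 0 ∧
    (ts.foldl (pvStepB option) (1, out)).2 =
      out ++ ts.dropWhile (fun t => !PySem.Str.startswith t "-") := by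
  intro ts
  induction ts with
  | nil => simp
  | cons t ts ih =>
    intro out
    by_cases hd : PySem.Chars.startswith t.toList ['-'] = true
    · simp [pvStepB, hd, foldB_state2 option ts (out ++ [t])]
    · simp only [Bool.not_eq_true] at hd
      simpa [pvStepB, hd, List.dropWhile_cons] using ih out

-- B's fold from state 0 when the option is absent
lemma foldB_not_mem (option : String) : ∀ (ts out : List String), option ∉ ts →
    ts.foldl (pvStepB option) (0, out) = (0, out ++ ts) := by
  intro ts
  induction ts with
  | nil => simp
  | cons t ts ih =>
    intro out h
    simp only [List.mem_cons, not_or] at h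
    have hne : t ≠ option := fun he => h.1 he.symm
    simp [pvStepB, hne, ih _ h.2]

-- B's fold from state 0 when the option is present
lemma foldB_mem (option : String) : ∀ (ts out : List String), option ∈ ts →
    (ts.foldl (pvStepB option) (0, out)).1 ≠ 0 ∧
    (ts.foldl (pvStepB option) (0, out)).2 =
      out ++ ts.takeWhile (fun t => t != option) ++
        ((ts.dropWhile (fun t => t != option)).tail.dropWhile
          (fun t => !PySem.Str.startswith t "-")) := by
  intro ts
  induction ts with
  | nil => intro out h; simp at h
  | cons t ts ih =>
    intro out h
    by_cases ht : t = option
    · subst ht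
      simpa [pvStepB, List.takeWhile_cons, List.dropWhile_cons] using foldB_state1 t ts out
    · have hmem : option ∈ ts := by
        rcases List.mem_cons.1 h with h' | h'
        · exact absurd h'.symm ht
        · exact h'
      simpa [pvStepB, ht, List.takeWhile_cons, List.dropWhile_cons, List.append_assoc]
        using ih (out ++ [t]) hmem

-- ===== VERDICT (by name: the statement is the Claim_ definition above) =====
theorem remove_option_spec : Claim_equal_remove_option := by
  intro content option _
  unfold Spec_remove_option remove_option remove_option_alt
  set ts := PySem.Str.split₀ (PySem.Str.strip content) with hts
  cases hf : pvFindA ts option 0 with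
  | none =>
    have hnm : option ∉ ts := (pvFindA_eq_none ts 0).1 hf
    simp [hf, foldB_not_mem option ts [] hnm]
  | some i =>
    obtain ⟨hlt, htake, hdrop⟩ := pvFindA_decomp ts i hf
    have hmem : option ∈ ts := by
      by_contra hnm
      rw [(pvFindA_eq_none ts 0).2 hnm] at hf
      simp at hf
    obtain ⟨h1, h2⟩ := foldB_mem option ts [] hmem
    have hA : ts.take i ++ ts.drop (pvSkipA ts (i + 1)) =
        (ts.foldl (pvStepB option) (0, [])).2 := by
      rw [h2, pvSkipA_drop ts (i + 1), hdrop, htake]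
      simp
    simp only [hf, if_neg h1]
    rw [hA]
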